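-- pv_equiv track=rewrite | github.com/lucasXiaofan/cs520_exercise2 | exercise1_multi_solution_variants/problem_6.py | containsCycle_gemini_cot
-- ===== SOURCE A (Python) =====
-- from typing import List
--
-- def containsCycle_gemini_cot(grid: List[List[str]]) -> bool:
--     m = len(grid)
--     n = len(grid[0])
--     visited = [[False] * n for _ in range(m)]
--
--     def dfs(row, col, parent_row, parent_col, start_char):
--         if row < 0 or row >= m or col < 0 or col >= n or grid[row][col] != start_char:
--             return False
--
--         if visited[row][col]:
--             return True
--
--         visited[row][col] = True
--
--         # Explore neighbors
--         directions = [(0, 1), (0, -1), (1, 0), (-1, 0)]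
--         for dr, dc in directions:
--             new_row, new_col = row + dr, col + dc
--             if 0 <= new_row < m and 0 <= new_col < n and (new_row != parent_row or new_col != parent_col) and grid[new_row][new_col] == start_char:
--                 if dfs(new_row, new_col, row, col, start_char):
--                     return True
--
--         return False
--
--     for i in range(m):
--         for j in range(n):
--             if not visited[i][j]:
--                 if dfs(i, j, -1, -1, grid[i][j]):
--                     return True
--
--     return False
-- ===== SOURCE B (Python) =====
-- from typing import List
--
-- def containsCycle_gemini_cot(grid: List[List[str]]) -> bool:
--     # Iterative DFS over flat cell indices (k = i*n + j) with an explicit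
--     # (cell, parent, next-direction-counter) stack; no recursion, visited is a
--     # flat set of ints, single sweep over range(m*n) instead of nested loops.
--     m = len(grid)
--     n = len(grid[0])
--     visited = set()
--     for k in range(m * n):
--         if k in visited:
--             continue
--         sc = grid[k // n][k % n]
--         visited.add(k)
--         stack = [(k, -1, 0)]
--         while stack:
--             cell, par, d = stack.pop()
--             if d == 4:
--                 continue
--             stack.append((cell, par, d + 1))
--             r, c = divmod(cell, n)
--             if d == 0:
--                 nr, nc = r, c + 1
--             elif d == 1:
--                 nr, nc = r, c - 1
--             elif d == 2:
--                 nr, nc = r + 1, c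
--             else:
--                 nr, nc = r - 1, c
--             if 0 <= nr < m and 0 <= nc < n:
--                 nk = nr * n + nc
--                 if nk != par and grid[nr][nc] == sc:
--                     if nk in visited:
--                         return True
--                     visited.add(nk)
--                     stack.append((nk, cell, 0))
--     return False
-- ===== Notes on version B (the rewrite author's own statement) =====
-- stated objective: alternative
-- what changed: Replaced A's recursive dfs over (row,col) pairs with a boolean visited matrix and nested row/column loops by an iterative DFS over flat integer cell indices k=i*n+j: a single sweep over range(m*n), a visited set of ints, and an explicit stack of (cell, parent, next-direction-counter) frames instead of recursion.
import Mathlib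
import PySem

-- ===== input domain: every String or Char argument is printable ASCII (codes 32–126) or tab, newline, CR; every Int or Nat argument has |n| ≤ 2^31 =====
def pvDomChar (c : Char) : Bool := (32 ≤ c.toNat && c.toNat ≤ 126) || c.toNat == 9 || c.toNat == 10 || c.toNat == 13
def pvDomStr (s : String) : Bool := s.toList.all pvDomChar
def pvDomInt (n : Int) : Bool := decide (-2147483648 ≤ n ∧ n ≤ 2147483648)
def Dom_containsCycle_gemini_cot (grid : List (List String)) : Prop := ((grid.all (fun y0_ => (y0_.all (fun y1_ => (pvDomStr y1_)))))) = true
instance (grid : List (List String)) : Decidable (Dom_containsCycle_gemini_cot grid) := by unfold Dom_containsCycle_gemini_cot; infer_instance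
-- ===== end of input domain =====

-- B replaces A's recursive DFS over (row, col) pairs and a boolean visited matrix by an
-- iterative DFS over flat integer cell indices k = i*n+j: a visited set of ints, one sweep
-- over range(m*n), and an explicit stack of (cell, parent, direction-counter) frames
-- (alternative decomposition, same cost); same return value on every input admitted by Pre_.

-- cell lookup grid[r][c]; all uses in both ports are guarded by 0 ≤ r < m, 0 ≤ c < n checks as in
-- the Pythons, so the "" default is never the value of an admitted (Pre_) run.
def pvCell (grid : List (List String)) (r c : Int) : String :=
  (PySem.List.pyGet? ((PySem.List.pyGet? grid r).getD []) c).getD ""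

-- ===== PORT A =====
-- the direction list [(0,1),(0,-1),(1,0),(-1,0)] of A's dfs
def pvDirs : List (Int × Int) := [(0, 1), (0, -1), (1, 0), (-1, 0)]

-- A's `visited` (an m×n boolean matrix) is ported as the list of coordinates set to True.
-- A's recursive dfs carries no fuel in Python; the Nat fuel here is only a totality device
-- (recursion depth is bounded by the number of cells, so fuel m*n+1 never runs out); the
-- `for dr, dc in directions` loop with its early `return True` is the foldl over pvDirs.
def dfsA (grid : List (List String)) (m n : Int) :
    Nat → List (Int × Int) → Int → Int → Int → Int → String → Bool × List (Int × Int)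
  | 0, v, _, _, _, _, _ => (false, v)
  | f + 1, v, r, c, pr, pc, sc =>
    if r < 0 ∨ m ≤ r ∨ c < 0 ∨ n ≤ c ∨ pvCell grid r c ≠ sc then (false, v)
    else if (r, c) ∈ v then (true, v)
    else
      pvDirs.foldl
        (fun acc d =>
          match acc with
          | (true, v') => (true, v')
          | (false, v') =>
            let nr := r + d.1
            let nc := c + d.2
            if 0 ≤ nr ∧ nr < m ∧ 0 ≤ nc ∧ nc < n ∧ (nr ≠ pr ∨ nc ≠ pc) ∧
                pvCell grid nr nc = sc then
              dfsA grid m n f v' nr nc r c sc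
            else (false, v'))
        (false, (r, c) :: v)

-- A's `for j in range(n)` loop at row i
def loopAJ (grid : List (List String)) (m n : Int) (fuel : Nat) (v : List (Int × Int))
    (i : Int) (js : List Int) : Bool × List (Int × Int) :=
  match js with
  | [] => (false, v)
  | j :: js' =>
    if (i, j) ∈ v then loopAJ grid m n fuel v i js'
    else
      match dfsA grid m n fuel v i j (-1) (-1) (pvCell grid i j) with
      | (true, v') => (true, v')
      | (false, v') => loopAJ grid m n fuel v' i js'

-- A's `for i in range(m)` loop
def loopAI (grid : List (List String)) (m n : Int) (fuel : Nat) (v : List (Int × Int))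
    (is : List Int) : Bool :=
  match is with
  | [] => false
  | i :: is' =>
    match loopAJ grid m n fuel v i (PySem.List.pyRange 0 n 1) with
    | (true, _) => true
    | (false, v') => loopAI grid m n fuel v' is'

def containsCycle_gemini_cot (grid : List (List String)) : Bool :=
  let m : Int := grid.length
  let n : Int := ((PySem.List.pyGet? grid 0).getD []).length
  let fuel : Nat := m.toNat * n.toNat + 1
  loopAI grid m n fuel [] (PySem.List.pyRange 0 m 1)

-- ===== PORT B =====
-- Source B's if/elif chain choosing the d-th neighbor (d = 0, 1, 2, 3) of (r, c)
def pvNbr (r c : Int) : Nat → Int × Int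
  | 0 => (r, c + 1)
  | 1 => (r, c - 1)
  | 2 => (r + 1, c)
  | _ => (r - 1, c)

-- Source B's `while stack:` loop; frames are (flat cell, flat parent (-1 = none), next direction
-- counter 0..4); the Python loop carries no fuel, the Nat fuel here is only a totality device
-- (6*m*n+6 steps always suffice; the lemmas below show the result is fuel-independent).
def runB (grid : List (List String)) (m n : Int) (sc : String) :
    Nat → PySem.Set Int → List (Int × Int × Nat) → Bool × PySem.Set Int
  | 0, vis, _ => (false, vis)
  | _ + 1, vis, [] => (false, vis)
  | f + 1, vis, (cell, par, d) :: rest =>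
    if d = 4 then runB grid m n sc f vis rest
    else
      if 0 ≤ (pvNbr (PySem.Int.floordiv cell n) (PySem.Int.mod cell n) d).1 ∧
          (pvNbr (PySem.Int.floordiv cell n) (PySem.Int.mod cell n) d).1 < m ∧
          0 ≤ (pvNbr (PySem.Int.floordiv cell n) (PySem.Int.mod cell n) d).2 ∧
          (pvNbr (PySem.Int.floordiv cell n) (PySem.Int.mod cell n) d).2 < n then
        if (pvNbr (PySem.Int.floordiv cell n) (PySem.Int.mod cell n) d).1 * n +
              (pvNbr (PySem.Int.floordiv cell n) (PySem.Int.mod cell n) d).2 ≠ par ∧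
            pvCell grid (pvNbr (PySem.Int.floordiv cell n) (PySem.Int.mod cell n) d).1
              (pvNbr (PySem.Int.floordiv cell n) (PySem.Int.mod cell n) d).2 = sc then
          if (pvNbr (PySem.Int.floordiv cell n) (PySem.Int.mod cell n) d).1 * n +
              (pvNbr (PySem.Int.floordiv cell n) (PySem.Int.mod cell n) d).2 ∈ vis then
            (true, vis)
          else
            runB grid m n sc f
              (PySem.Set.add vis ((pvNbr (PySem.Int.floordiv cell n) (PySem.Int.mod cell n) d).1 * n +
                (pvNbr (PySem.Int.floordiv cell n) (PySem.Int.mod cell n) d).2))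
              (((pvNbr (PySem.Int.floordiv cell n) (PySem.Int.mod cell n) d).1 * n +
                  (pvNbr (PySem.Int.floordiv cell n) (PySem.Int.mod cell n) d).2, cell, 0) ::
                (cell, par, d + 1) :: rest)
        else runB grid m n sc f vis ((cell, par, d + 1) :: rest)
      else runB grid m n sc f vis ((cell, par, d + 1) :: rest)

-- Source B's `for k in range(m * n):` sweep, threading the visited set of flat indices
def sweepB (grid : List (List String)) (m n : Int) (fB : Nat) :
    PySem.Set Int → List Int → Bool × PySem.Set Int
  | vis, [] => (false, vis)
  | vis, k :: ks =>
    if k ∈ vis then sweepB grid m n fB vis ks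
    else
      match runB grid m n (pvCell grid (PySem.Int.floordiv k n) (PySem.Int.mod k n)) fB
          (PySem.Set.add vis k) [(k, -1, 0)] with
      | (true, vis') => (true, vis')
      | (false, vis') => sweepB grid m n fB vis' ks

def containsCycle_gemini_cot_alt (grid : List (List String)) : Bool :=
  let m : Int := grid.length
  let n : Int := ((PySem.List.pyGet? grid 0).getD []).length
  let fB : Nat := 6 * (m.toNat * n.toNat) + 6
  (sweepB grid m n fB PySem.Set.empty (PySem.List.pyRange 0 (m * n) 1)).1

-- ===== PRECONDITION & SPEC =====
-- Pre_ excludes exactly the inputs where Python A raises IndexError: the empty grid (grid[0])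
-- and grids with some row shorter than the first row (grid[row][col] for col < len(grid[0])).
def Pre_containsCycle_gemini_cot (grid : List (List String)) : Prop :=
  grid ≠ [] ∧ ∀ row ∈ grid, (grid.headD []).length ≤ row.length
instance (grid : List (List String)) : Decidable (Pre_containsCycle_gemini_cot grid) := by
  unfold Pre_containsCycle_gemini_cot; infer_instance

def pvWitness_containsCycle_gemini_cot : List (List String) := [[""]]

def Spec_containsCycle_gemini_cot (grid : List (List String)) (out : Bool) : Prop := out = containsCycle_gemini_cot_alt grid
instance (grid : List (List String)) (out : Bool) : Decidable (Spec_containsCycle_gemini_cot grid out) := by unfold Spec_containsCycle_gemini_cot; infer_instance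

-- ===== CLAIM (what is proved, stated in full; the proofs are below) =====
def Claim_equal_containsCycle_gemini_cot : Prop := ∀ (grid : List (List String)), Dom_containsCycle_gemini_cot grid → Pre_containsCycle_gemini_cot grid → Spec_containsCycle_gemini_cot grid (containsCycle_gemini_cot grid)

-- ===== LEMMAS AND PROOFS =====

theorem pvWitness_ok : Dom_containsCycle_gemini_cot pvWitness_containsCycle_gemini_cot ∧
    Pre_containsCycle_gemini_cot pvWitness_containsCycle_gemini_cot := by decide

-- counting device for the proofs: the grid cells not yet visited
def pvCells (m n : Int) : List (Int × Int) :=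
  (PySem.List.pyRange 0 m 1).flatMap (fun i => (PySem.List.pyRange 0 n 1).map (fun j => (i, j)))

def pvCount (m n : Int) (v : List (Int × Int)) : Nat :=
  ((pvCells m n).filter (fun p => decide (p ∉ v))).length

-- proof-side coordinate machine: A's direction loop reorganised as an explicit stack machine
-- (the bridge between dfsA and runB); weight of a stack = steps it can still cause
def machB (grid : List (List String)) (m n : Int) (sc : String) :
    Nat → List (Int × Int) → List (Int × Int × Int × Int × List (Int × Int)) →
      Bool × List (Int × Int)
  | 0, v, _ => (false, v)
  | fM + 1, v, stack =>
    match stack with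
    | [] => (false, v)
    | (_, _, _, _, []) :: rest => machB grid m n sc fM v rest
    | (r, c, pr, pc, (dr, dc) :: ds) :: rest =>
      let nr := r + dr
      let nc := c + dc
      if 0 ≤ nr ∧ nr < m ∧ 0 ≤ nc ∧ nc < n ∧ (nr, nc) ≠ (pr, pc) ∧
          pvCell grid nr nc = sc then
        if (nr, nc) ∈ v then (true, v)
        else machB grid m n sc fM ((nr, nc) :: v)
          ((nr, nc, r, c, pvDirs) :: (r, c, pr, pc, ds) :: rest)
      else machB grid m n sc fM v ((r, c, pr, pc, ds) :: rest)

def pvWt : Int × Int × Int × Int × List (Int × Int) → Nat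
  | (_, _, _, _, ds) => ds.length + 1

def pvSum (stack : List (Int × Int × Int × Int × List (Int × Int))) : Nat :=
  (stack.map pvWt).sum

theorem pvSum_cons (fr : Int × Int × Int × Int × List (Int × Int)) (rest) :
    pvSum (fr :: rest) = pvWt fr + pvSum rest := by
  simp [pvSum]

theorem pvFilter_notMem_le (t : List (Int × Int)) (x : Int × Int) (v : List (Int × Int)) :
    (t.filter (fun p => decide (p ∉ x :: v))).length ≤ (t.filter (fun p => decide (p ∉ v))).length :=
  List.Sublist.length_le (List.monotone_filter_right t (fun a ha => by
    simp only [decide_eq_true_eq, List.mem_cons, not_or] at ha ⊢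
    exact ha.2))

theorem pvFilter_notMem_lt (t : List (Int × Int)) (x : Int × Int) (v : List (Int × Int))
    (hx : x ∈ t) (hxv : x ∉ v) :
    (t.filter (fun p => decide (p ∉ x :: v))).length < (t.filter (fun p => decide (p ∉ v))).length := by
  induction t with
  | nil => cases hx
  | cons a t ih =>
    rw [List.filter_cons, List.filter_cons]
    split_ifs with h1 h2 h2 <;>
      simp only [decide_eq_true_eq, List.mem_cons, not_or, not_and, not_not] at h1 h2
    · rcases List.mem_cons.1 hx with rfl | hx'
      · exact absurd rfl h1.1
      · simpa using Nat.succ_lt_succ (ih hx')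
    · exact absurd h2 h1.2
    · have := pvFilter_notMem_le t x v
      simp only [List.length_cons]
      omega
    · rcases List.mem_cons.1 hx with rfl | hx'
      · exact absurd h2 hxv
      · exact ih hx'

theorem pvMem_pvCells (m n a b : Int) (h1 : 0 ≤ a) (h2 : a < m) (h3 : 0 ≤ b) (h4 : b < n) :
    (a, b) ∈ pvCells m n := by
  unfold pvCells
  have hm : a ∈ PySem.List.pyRange 0 m 1 := (PySem.List.mem_pyRange_one).2 ⟨h1, h2⟩
  have hn : b ∈ PySem.List.pyRange 0 n 1 := (PySem.List.mem_pyRange_one).2 ⟨h3, h4⟩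
  exact List.mem_flatMap.2 ⟨a, hm, List.mem_map.2 ⟨b, hn, rfl⟩⟩

theorem pvCount_cons_lt (m n : Int) (v : List (Int × Int)) (a b : Int)
    (h1 : 0 ≤ a) (h2 : a < m) (h3 : 0 ≤ b) (h4 : b < n) (hv : (a, b) ∉ v) :
    pvCount m n ((a, b) :: v) < pvCount m n v :=
  pvFilter_notMem_lt (pvCells m n) (a, b) v (pvMem_pvCells m n a b h1 h2 h3 h4) hv

theorem pvCount_le (m n : Int) (v : List (Int × Int)) : pvCount m n v ≤ (pvCells m n).length :=
  List.length_filter_le _ _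

theorem pvCells_length (m n : Int) : (pvCells m n).length = m.toNat * n.toNat := by
  simp [pvCells, List.length_flatMap, PySem.List.length_pyRange_one,
    List.map_const', List.sum_replicate, smul_eq_mul]

theorem pair_ne_iff (a b c d : Int) : (a, b) ≠ (c, d) ↔ (a ≠ c ∨ b ≠ d) := by
  constructor
  · intro h
    by_contra hn
    push_neg at hn
    exact h (by rw [hn.1, hn.2])
  · rintro (h | h) he
    · exact h (congrArg Prod.fst he)
    · exact h (congrArg Prod.snd he)

-- A's direction loop named, for the proofs: exactly the foldl inside dfsA
def stepF (grid : List (List String)) (m n : Int) (f : Nat) (r c pr pc : Int) (sc : String)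
    (acc : Bool × List (Int × Int)) (d : Int × Int) : Bool × List (Int × Int) :=
  match acc with
  | (true, v') => (true, v')
  | (false, v') =>
    let nr := r + d.1
    let nc := c + d.2
    if 0 ≤ nr ∧ nr < m ∧ 0 ≤ nc ∧ nc < n ∧ (nr ≠ pr ∨ nc ≠ pc) ∧
        pvCell grid nr nc = sc then
      dfsA grid m n f v' nr nc r c sc
    else (false, v')

def tryF (grid : List (List String)) (m n : Int) (f : Nat) (dirs : List (Int × Int))
    (v : List (Int × Int)) (r c pr pc : Int) (sc : String) : Bool × List (Int × Int) :=
  dirs.foldl (stepF grid m n f r c pr pc sc) (false, v)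

theorem dfsA_succ (grid : List (List String)) (m n : Int) (f : Nat) (v : List (Int × Int))
    (r c pr pc : Int) (sc : String) :
    dfsA grid m n (f + 1) v r c pr pc sc =
      if r < 0 ∨ m ≤ r ∨ c < 0 ∨ n ≤ c ∨ pvCell grid r c ≠ sc then (false, v)
      else if (r, c) ∈ v then (true, v)
      else tryF grid m n f pvDirs ((r, c) :: v) r c pr pc sc := rfl

theorem foldl_stepF_true (grid : List (List String)) (m n : Int) (f : Nat) (r c pr pc : Int)
    (sc : String) : ∀ (dirs : List (Int × Int)) (v : List (Int × Int)),
    dirs.foldl (stepF grid m n f r c pr pc sc) (true, v) = (true, v) := by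
  intro dirs
  induction dirs with
  | nil => intro v; rfl
  | cons d ds ih => intro v; exact ih v

-- visited never shrinks through the direction loop (given it never shrinks through dfsA)
theorem mono_fold (grid : List (List String)) (m n : Int) (f : Nat)
    (hd : ∀ v r c pr pc sc, pvCount m n (dfsA grid m n f v r c pr pc sc).2 ≤ pvCount m n v) :
    ∀ dirs v r c pr pc sc,
      pvCount m n (tryF grid m n f dirs v r c pr pc sc).2 ≤ pvCount m n v := by
  intro dirs
  induction dirs with
  | nil =>
    intro v r c pr pc sc
    simp [tryF]
  | cons d ds ih =>
    intro v r c pr pc sc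
    rw [tryF, List.foldl_cons]
    show pvCount m n ((ds.foldl (stepF grid m n f r c pr pc sc)
      (stepF grid m n f r c pr pc sc (false, v) d))).2 ≤ pvCount m n v
    rw [stepF]
    split
    · rcases hA : dfsA grid m n f v (r + d.1) (c + d.2) r c sc with ⟨b, v'⟩
      have h1 : pvCount m n v' ≤ pvCount m n v := by
        have h2 := hd v (r + d.1) (c + d.2) r c sc
        rw [hA] at h2
        exact h2
      cases b
      · exact le_trans (ih v' r c pr pc sc) h1
      · rw [foldl_stepF_true]
        exact h1
    · exact ih v r c pr pc sc

-- visited never shrinks through dfsA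
theorem mono_dfs (grid : List (List String)) (m n : Int) (f : Nat) :
    ∀ v r c pr pc sc, pvCount m n (dfsA grid m n f v r c pr pc sc).2 ≤ pvCount m n v := by
  induction f with
  | zero =>
    intro v r c pr pc sc
    simp [dfsA]
  | succ f' ih =>
    intro v r c pr pc sc
    rw [dfsA_succ]
    split_ifs with hg hm
    · exact le_refl _
    · exact le_refl _
    · push_neg at hg
      obtain ⟨g1, g2, g3, g4, _⟩ := hg
      exact le_trans (mono_fold grid m n f' ih pvDirs ((r, c) :: v) r c pr pc sc)
        (le_of_lt (pvCount_cons_lt m n v r c (by omega) (by omega) (by omega) (by omega) hm))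

-- the coordinate machine's fuel is irrelevant once it exceeds the measure 6*count + pvSum
theorem machB_irrel (grid : List (List String)) (m n : Int) (sc : String) :
    ∀ (f1 : Nat) (f2 : Nat) (v : List (Int × Int)) stack,
      6 * pvCount m n v + pvSum stack < f1 → 6 * pvCount m n v + pvSum stack < f2 →
      machB grid m n sc f1 v stack = machB grid m n sc f2 v stack := by
  intro f1
  induction f1 with
  | zero =>
    intro f2 v stack h1 h2
    omega
  | succ g1 ih =>
    intro f2 v stack h1 h2
    obtain ⟨g2, rfl⟩ : ∃ g2, f2 = g2 + 1 := ⟨f2 - 1, by omega⟩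
    match stack with
    | [] => rfl
    | (r, c, pr, pc, []) :: rest =>
      show machB grid m n sc g1 v rest = machB grid m n sc g2 v rest
      simp only [pvSum_cons, pvWt] at h1 h2
      exact ih g2 v rest (by omega) (by omega)
    | (r, c, pr, pc, (dr, dc) :: ds) :: rest =>
      simp only [pvSum_cons, pvWt] at h1 h2
      simp only [List.length_cons] at h1 h2
      show machB grid m n sc (g1 + 1) v ((r, c, pr, pc, (dr, dc) :: ds) :: rest) =
        machB grid m n sc (g2 + 1) v ((r, c, pr, pc, (dr, dc) :: ds) :: rest)
      rw [machB, machB]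
      by_cases hc : 0 ≤ r + dr ∧ r + dr < m ∧ 0 ≤ c + dc ∧ c + dc < n ∧
          (r + dr, c + dc) ≠ (pr, pc) ∧ pvCell grid (r + dr) (c + dc) = sc
      · rw [if_pos hc, if_pos hc]
        by_cases hv : (r + dr, c + dc) ∈ v
        · rw [if_pos hv, if_pos hv]
        · rw [if_neg hv, if_neg hv]
          have hlt : pvCount m n ((r + dr, c + dc) :: v) < pvCount m n v :=
            pvCount_cons_lt m n v _ _ hc.1 hc.2.1 hc.2.2.1 hc.2.2.2.1 hv
          apply ih
          · simp only [pvSum_cons, pvWt, pvDirs, List.length_cons, List.length_nil]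
            omega
          · simp only [pvSum_cons, pvWt, pvDirs, List.length_cons, List.length_nil]
            omega
      · rw [if_neg hc, if_neg hc]
        apply ih
        · simp only [pvSum_cons, pvWt]
          omega
        · simp only [pvSum_cons, pvWt]
          omega

theorem machB_nil (grid : List (List String)) (m n : Int) (sc : String) (fM : Nat)
    (v : List (Int × Int)) : machB grid m n sc fM v [] = (false, v) := by
  cases fM <;> rfl

-- the simulation: the coordinate machine computes exactly A's direction loop, frame by frame
theorem sim (grid : List (List String)) (m n : Int) (sc : String) :
    ∀ (f : Nat) (dirs : List (Int × Int)) (v : List (Int × Int)) (r c pr pc : Int) rest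
      (fM : Nat),
      6 * pvCount m n v + pvSum ((r, c, pr, pc, dirs) :: rest) < fM →
      pvCount m n v < f →
      machB grid m n sc fM v ((r, c, pr, pc, dirs) :: rest) =
        (match tryF grid m n f dirs v r c pr pc sc with
         | (true, v') => (true, v')
         | (false, v') => machB grid m n sc fM v' rest) := by
  intro f
  induction f with
  | zero =>
    intro dirs v r c pr pc rest fM hM h
    exact absurd h (Nat.not_lt_zero _)
  | succ f' ihf =>
    intro dirs
    induction dirs with
    | nil =>
      intro v r c pr pc rest fM hM hcnt
      obtain ⟨g, rfl⟩ : ∃ g, fM = g + 1 := ⟨fM - 1, by omega⟩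
      simp only [pvSum_cons, pvWt] at hM
      show machB grid m n sc g v rest = _
      rw [show tryF grid m n (f' + 1) [] v r c pr pc sc = (false, v) from rfl]
      exact machB_irrel grid m n sc g (g + 1) v rest (by omega) (by omega)
    | cons d ds ihd =>
      obtain ⟨dr, dc⟩ := d
      intro v r c pr pc rest fM hM hcnt
      obtain ⟨g, rfl⟩ : ∃ g, fM = g + 1 := ⟨fM - 1, by omega⟩
      simp only [pvSum_cons, pvWt, List.length_cons] at hM
      have hiff : (0 ≤ r + dr ∧ r + dr < m ∧ 0 ≤ c + dc ∧ c + dc < n ∧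
            (r + dr, c + dc) ≠ (pr, pc) ∧ pvCell grid (r + dr) (c + dc) = sc) ↔
          (0 ≤ r + dr ∧ r + dr < m ∧ 0 ≤ c + dc ∧ c + dc < n ∧
            (r + dr ≠ pr ∨ c + dc ≠ pc) ∧ pvCell grid (r + dr) (c + dc) = sc) := by
        rw [pair_ne_iff]
      have hstep : tryF grid m n (f' + 1) ((dr, dc) :: ds) v r c pr pc sc =
          (ds.foldl (stepF grid m n (f' + 1) r c pr pc sc)
            (stepF grid m n (f' + 1) r c pr pc sc (false, v) (dr, dc))) := by
        rw [tryF, List.foldl_cons]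
      rw [machB]
      by_cases hc : 0 ≤ r + dr ∧ r + dr < m ∧ 0 ≤ c + dc ∧ c + dc < n ∧
          (r + dr, c + dc) ≠ (pr, pc) ∧ pvCell grid (r + dr) (c + dc) = sc
      · rw [if_pos hc]
        obtain ⟨a1, a2, a3, a4, a5, a6⟩ := hc
        have hneg : ¬(r + dr < 0 ∨ m ≤ r + dr ∨ c + dc < 0 ∨ n ≤ c + dc ∨
            pvCell grid (r + dr) (c + dc) ≠ sc) := by
          push_neg
          exact ⟨by omega, by omega, by omega, by omega, a6⟩
        have hs2 : stepF grid m n (f' + 1) r c pr pc sc (false, v) (dr, dc) =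
            dfsA grid m n (f' + 1) v (r + dr) (c + dc) r c sc := by
          rw [stepF]
          rw [if_pos (hiff.mp ⟨a1, a2, a3, a4, a5, a6⟩)]
        by_cases hvis : (r + dr, c + dc) ∈ v
        · rw [if_pos hvis, hstep, hs2, dfsA_succ, if_neg hneg, if_pos hvis,
            foldl_stepF_true]
        · rw [if_neg hvis, hstep, hs2, dfsA_succ, if_neg hneg, if_neg hvis]
          have hlt : pvCount m n ((r + dr, c + dc) :: v) < pvCount m n v :=
            pvCount_cons_lt m n v _ _ a1 a2 a3 a4 hvis
          rw [show tryF grid m n f' pvDirs ((r + dr, c + dc) :: v) (r + dr) (c + dc) r c sc =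
              List.foldl (stepF grid m n f' (r + dr) (c + dc) r c sc) (false, (r + dr, c + dc) :: v)
                pvDirs from rfl] at *
          rw [ihf pvDirs ((r + dr, c + dc) :: v) (r + dr) (c + dc) r c
            ((r, c, pr, pc, ds) :: rest) g
            (by simp only [pvSum_cons, pvWt, pvDirs, List.length_cons, List.length_nil]
                omega)
            (by omega)]
          rcases h2 : tryF grid m n f' pvDirs ((r + dr, c + dc) :: v) (r + dr) (c + dc) r c sc
            with ⟨b2, v2⟩
          have hv2 : pvCount m n v2 ≤ pvCount m n ((r + dr, c + dc) :: v) := by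
            have h3 := mono_fold grid m n f' (mono_dfs grid m n f') pvDirs
              ((r + dr, c + dc) :: v) (r + dr) (c + dc) r c sc
            rw [h2] at h3
            exact h3
          rw [show List.foldl (stepF grid m n f' (r + dr) (c + dc) r c sc)
              (false, (r + dr, c + dc) :: v) pvDirs =
              tryF grid m n f' pvDirs ((r + dr, c + dc) :: v) (r + dr) (c + dc) r c sc from rfl,
            h2]
          cases b2
          · -- dfs came back (false, v2): continue with the remaining directions
            dsimp only
            rw [show List.foldl (stepF grid m n (f' + 1) r c pr pc sc) (false, v2) ds =
                tryF grid m n (f' + 1) ds v2 r c pr pc sc from rfl]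
            rw [ihd v2 r c pr pc rest g
              (by simp only [pvSum_cons, pvWt]; omega) (by omega)]
            rcases h3 : tryF grid m n (f' + 1) ds v2 r c pr pc sc with ⟨b3, v3⟩
            have hv3 : pvCount m n v3 ≤ pvCount m n v2 := by
              have h4 := mono_fold grid m n (f' + 1) (mono_dfs grid m n (f' + 1)) ds v2 r c pr pc sc
              rw [h3] at h4
              exact h4
            cases b3
            · dsimp only
              exact machB_irrel grid m n sc g (g + 1) v3 rest (by omega) (by omega)
            · dsimp only
          · -- dfs found the cycle: everything is (true, v2)
            dsimp only
            rw [foldl_stepF_true]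
      · rw [if_neg hc, hstep]
        have hs2 : stepF grid m n (f' + 1) r c pr pc sc (false, v) (dr, dc) = (false, v) := by
          rw [stepF]
          rw [if_neg (fun h => hc (hiff.mpr h))]
        rw [hs2]
        rw [show List.foldl (stepF grid m n (f' + 1) r c pr pc sc) (false, v) ds =
            tryF grid m n (f' + 1) ds v r c pr pc sc from rfl]
        rw [ihd v r c pr pc rest g (by simp only [pvSum_cons, pvWt]; omega) hcnt]
        rcases h3 : tryF grid m n (f' + 1) ds v r c pr pc sc with ⟨b3, v3⟩
        have hv3 : pvCount m n v3 ≤ pvCount m n v := by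
          have h4 := mono_fold grid m n (f' + 1) (mono_dfs grid m n (f' + 1)) ds v r c pr pc sc
          rw [h3] at h4
          exact h4
        cases b3
        · dsimp only
          exact machB_irrel grid m n sc g (g + 1) v3 rest (by omega) (by omega)
        · dsimp only

-- one outer-loop cell: A's dfs call equals a coordinate-machine run
theorem cell_eq (grid : List (List String)) (m n : Int) (f fM : Nat) (v : List (Int × Int))
    (i j : Int) (h1 : 0 ≤ i) (h2 : i < m) (h3 : 0 ≤ j) (h4 : j < n) (hv : (i, j) ∉ v)
    (hF : (pvCells m n).length ≤ f) (hM : 6 * (pvCells m n).length + 6 ≤ fM) :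
    dfsA grid m n (f + 1) v i j (-1) (-1) (pvCell grid i j) =
      machB grid m n (pvCell grid i j) fM ((i, j) :: v) [(i, j, -1, -1, pvDirs)] := by
  have hg : ¬(i < 0 ∨ m ≤ i ∨ j < 0 ∨ n ≤ j ∨ pvCell grid i j ≠ pvCell grid i j) := by
    push_neg
    exact ⟨by omega, by omega, by omega, by omega, rfl⟩
  have hcv : pvCount m n ((i, j) :: v) < pvCount m n v :=
    pvCount_cons_lt m n v i j h1 h2 h3 h4 hv
  have hle := pvCount_le m n v
  rw [dfsA_succ, if_neg hg, if_neg hv]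
  rw [sim grid m n (pvCell grid i j) f pvDirs ((i, j) :: v) i j (-1) (-1) [] fM
    (by simp only [pvSum, List.map_cons, List.map_nil, List.sum_cons, List.sum_nil, pvWt,
          pvDirs, List.length_cons, List.length_nil]
        omega)
    (by omega)]
  rcases h2 : tryF grid m n f pvDirs ((i, j) :: v) i j (-1) (-1) (pvCell grid i j) with ⟨b, v'⟩
  cases b
  · dsimp only
    rw [machB_nil]
  · rfl

-- ===== the flat-index ↔ coordinate correspondence =====

theorem enc_inj (n a b x y : Int) (hn : 0 < n) (hb0 : 0 ≤ b) (hbn : b < n)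
    (hy0 : 0 ≤ y) (hyn : y < n) : a * n + b = x * n + y ↔ (a = x ∧ b = y) := by
  constructor
  · intro h
    have h2 : (a - x) * n = y - b := by linear_combination h
    have hax : a = x := by
      rcases lt_trichotomy a x with hlt | heq | hgt
      · have hmul : (a - x) * n ≤ -1 * n :=
          mul_le_mul_of_nonneg_right (by omega) (le_of_lt hn)
        nlinarith
      · exact heq
      · have hmul : 1 * n ≤ (a - x) * n :=
          mul_le_mul_of_nonneg_right (by omega) (le_of_lt hn)
        nlinarith
    refine ⟨hax, ?_⟩
    subst hax
    linarith
  · rintro ⟨rfl, rfl⟩; rfl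

theorem enc_div_fst (n r c : Int) (hn : 0 < n) (hc0 : 0 ≤ c) (hcn : c < n) :
    PySem.Int.floordiv (r * n + c) n = r := by
  rw [PySem.Int.floordiv_eq_ediv_of_pos hn, show r * n + c = c + r * n by ring,
    Int.add_mul_ediv_right c r (by omega), Int.ediv_eq_zero_of_lt hc0 hcn]
  omega

theorem enc_div_snd (n r c : Int) (hn : 0 < n) (hc0 : 0 ≤ c) (hcn : c < n) :
    PySem.Int.mod (r * n + c) n = c := by
  rw [PySem.Int.mod_eq_emod_of_pos hn, show r * n + c = c + n * r by ring,
    Int.add_mul_emod_self_left, Int.emod_eq_of_lt hc0 hcn]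

-- the correspondence between a coordinate frame of machB and a flat frame of runB
def GoodF (n : Int) : (Int × Int × Int × Int × List (Int × Int)) → (Int × Int × Nat) → Prop
  | (r, c, pr, pc, ds), (k, p, d) =>
    k = r * n + c ∧ 0 ≤ c ∧ c < n ∧ ds = pvDirs.drop d ∧ d ≤ 4 ∧
      ((pr = -1 ∧ pc = -1 ∧ p = -1) ∨ (0 ≤ pc ∧ pc < n ∧ p = pr * n + pc))

-- the correspondence between A's coordinate visited list and B's flat visited set
def RelV (m n : Int) (v : List (Int × Int)) (vis : List Int) : Prop :=
  ∀ a b : Int, 0 ≤ a → a < m → 0 ≤ b → b < n → ((a, b) ∈ v ↔ a * n + b ∈ vis)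

theorem RelV_add (m n : Int) (hn : 0 < n) (v : List (Int × Int)) (vis : List Int)
    (a0 b0 : Int) (h1 : 0 ≤ b0) (h2 : b0 < n) (hRel : RelV m n v vis) :
    RelV m n ((a0, b0) :: v) (PySem.Set.add vis (a0 * n + b0)) := by
  intro a b ha1 ha2 hb1 hb2
  rw [List.mem_cons, PySem.Set.mem_add, hRel a b ha1 ha2 hb1 hb2]
  have hiff : ((a, b) = (a0, b0)) ↔ (a * n + b = a0 * n + b0) := by
    rw [Prod.mk.injEq, enc_inj n a b a0 b0 hn hb1 hb2 h1 h2]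
  tauto

-- one non-exhausted frame: runB and machB take the same branch and stay in correspondence
theorem run_corr_cons (grid : List (List String)) (m n : Int) (sc : String) (hn : 0 < n)
    (f : Nat)
    (ih : ∀ (v : List (Int × Int)) (vis : List Int) stC stF,
      RelV m n v vis → List.Forall₂ (GoodF n) stC stF →
      (runB grid m n sc f vis stF).1 = (machB grid m n sc f v stC).1 ∧
        RelV m n (machB grid m n sc f v stC).2 (runB grid m n sc f vis stF).2)
    (r c pr pc p : Int) (d : Nat) (dr dc : Int)
    (restC : List (Int × Int × Int × Int × List (Int × Int))) (restF : List (Int × Int × Nat))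
    (v : List (Int × Int)) (vis : List Int)
    (hc0 : 0 ≤ c) (hcn : c < n)
    (hdrop : pvDirs.drop d = (dr, dc) :: pvDirs.drop (d + 1))
    (hnbr : pvNbr r c d = (r + dr, c + dc))
    (h4 : ¬ d = 4) (hd1 : d + 1 ≤ 4)
    (hpar : (pr = -1 ∧ pc = -1 ∧ p = -1) ∨ (0 ≤ pc ∧ pc < n ∧ p = pr * n + pc))
    (hRel : RelV m n v vis) (htail : List.Forall₂ (GoodF n) restC restF) :
    (runB grid m n sc (f + 1) vis ((r * n + c, p, d) :: restF)).1 =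
      (machB grid m n sc (f + 1) v ((r, c, pr, pc, pvDirs.drop d) :: restC)).1 ∧
      RelV m n (machB grid m n sc (f + 1) v ((r, c, pr, pc, pvDirs.drop d) :: restC)).2
        (runB grid m n sc (f + 1) vis ((r * n + c, p, d) :: restF)).2 := by
  have e1 : PySem.Int.floordiv (r * n + c) n = r := enc_div_fst n r c hn hc0 hcn
  have e2 : PySem.Int.mod (r * n + c) n = c := enc_div_snd n r c hn hc0 hcn
  rw [hdrop]
  rw [machB, runB, if_neg h4, e1, e2, hnbr]
  dsimp only
  by_cases hb : 0 ≤ r + dr ∧ r + dr < m ∧ 0 ≤ c + dc ∧ c + dc < n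
  · obtain ⟨hb1, hb2, hb3, hb4⟩ := hb
    rw [if_pos ⟨hb1, hb2, hb3, hb4⟩]
    have hpeq : ((r + dr) * n + (c + dc) ≠ p) ↔ ((r + dr, c + dc) ≠ (pr, pc)) := by
      rw [pair_ne_iff]
      rcases hpar with ⟨hq1, hq2, hq3⟩ | ⟨hq1, hq2, hq3⟩
      · subst hq3
        have hnk : 0 ≤ (r + dr) * n + (c + dc) :=
          add_nonneg (mul_nonneg hb1 (le_of_lt hn)) hb3
        refine iff_of_true (fun hEq => ?_) (Or.inl (fun hEq => ?_))
        · rw [hEq] at hnk; omega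
        · rw [hq1] at hEq; omega
      · rw [hq3, Ne, enc_inj n (r + dr) (c + dc) pr pc hn hb3 hb4 hq1 hq2]
        exact not_and_or
    by_cases hx : (r + dr, c + dc) ≠ (pr, pc) ∧ pvCell grid (r + dr) (c + dc) = sc
    · have hA6 : 0 ≤ r + dr ∧ r + dr < m ∧ 0 ≤ c + dc ∧ c + dc < n ∧
          (r + dr, c + dc) ≠ (pr, pc) ∧ pvCell grid (r + dr) (c + dc) = sc :=
        ⟨hb1, hb2, hb3, hb4, hx.1, hx.2⟩
      have hB2 : (r + dr) * n + (c + dc) ≠ p ∧ pvCell grid (r + dr) (c + dc) = sc :=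
        ⟨hpeq.mpr hx.1, hx.2⟩
      rw [if_pos hB2, if_pos hA6]
      have hmem : ((r + dr, c + dc) ∈ v) ↔ ((r + dr) * n + (c + dc) ∈ vis) :=
        hRel _ _ hb1 hb2 hb3 hb4
      by_cases hv : (r + dr, c + dc) ∈ v
      · rw [if_pos hv, if_pos (hmem.mp hv)]
        exact ⟨rfl, hRel⟩
      · rw [if_neg hv, if_neg (fun h => hv (hmem.mpr h))]
        refine ih ((r + dr, c + dc) :: v) (PySem.Set.add vis ((r + dr) * n + (c + dc))) _ _
          (RelV_add m n hn v vis _ _ hb3 hb4 hRel)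
          (List.Forall₂.cons ⟨rfl, hb3, hb4, rfl, by omega, Or.inr ⟨hc0, hcn, rfl⟩⟩
            (List.Forall₂.cons ⟨rfl, hc0, hcn, rfl, hd1, hpar⟩ htail))
    · have hnA : ¬(0 ≤ r + dr ∧ r + dr < m ∧ 0 ≤ c + dc ∧ c + dc < n ∧
          (r + dr, c + dc) ≠ (pr, pc) ∧ pvCell grid (r + dr) (c + dc) = sc) :=
        fun h => hx ⟨h.2.2.2.2.1, h.2.2.2.2.2⟩
      have hnB : ¬((r + dr) * n + (c + dc) ≠ p ∧ pvCell grid (r + dr) (c + dc) = sc) :=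
        fun h => hx ⟨hpeq.mp h.1, h.2⟩
      rw [if_neg hnB, if_neg hnA]
      exact ih v vis _ _ hRel
        (List.Forall₂.cons ⟨rfl, hc0, hcn, rfl, hd1, hpar⟩ htail)
  · have hnA : ¬(0 ≤ r + dr ∧ r + dr < m ∧ 0 ≤ c + dc ∧ c + dc < n ∧
        (r + dr, c + dc) ≠ (pr, pc) ∧ pvCell grid (r + dr) (c + dc) = sc) :=
      fun h => hb ⟨h.1, h.2.1, h.2.2.1, h.2.2.2.1⟩
    rw [if_neg hb, if_neg hnA]
    exact ih v vis _ _ hRel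
      (List.Forall₂.cons ⟨rfl, hc0, hcn, rfl, hd1, hpar⟩ htail)

-- the lockstep correspondence: runB over flat frames computes machB over coordinate frames
theorem run_corr (grid : List (List String)) (m n : Int) (sc : String) (hn : 0 < n) :
    ∀ (f : Nat) (v : List (Int × Int)) (vis : List Int)
      (stC : List (Int × Int × Int × Int × List (Int × Int))) (stF : List (Int × Int × Nat)),
      RelV m n v vis → List.Forall₂ (GoodF n) stC stF →
      (runB grid m n sc f vis stF).1 = (machB grid m n sc f v stC).1 ∧
        RelV m n (machB grid m n sc f v stC).2 (runB grid m n sc f vis stF).2 := by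
  intro f
  induction f with
  | zero => intro v vis stC stF hRel _; exact ⟨rfl, hRel⟩
  | succ f ih =>
    intro v vis stC stF hRel hst
    cases hst with
    | nil => exact ⟨rfl, hRel⟩
    | cons hfr htail =>
      rename_i fc ff restC restF
      obtain ⟨r, c, pr, pc, ds⟩ := fc
      obtain ⟨k, p, d⟩ := ff
      obtain ⟨hk, hc0, hcn, hds, hd4, hpar⟩ := hfr
      subst hk
      subst hds
      by_cases h4 : d = 4
      · subst h4
        rw [show pvDirs.drop 4 = ([] : List (Int × Int)) from rfl]
        have e1 : runB grid m n sc (f + 1) vis ((r * n + c, p, 4) :: restF) =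
            runB grid m n sc f vis restF := by
          rw [runB, if_pos rfl]
        have e2 : machB grid m n sc (f + 1) v ((r, c, pr, pc, ([] : List (Int × Int))) :: restC) =
            machB grid m n sc f v restC := rfl
        rw [e1, e2]
        exact ih v vis restC restF hRel htail
      · have hlt : d < 4 := by omega
        interval_cases d
        · exact run_corr_cons grid m n sc hn f ih r c pr pc p 0 0 1 restC restF v vis
            hc0 hcn rfl (by norm_num [pvNbr]) (by omega) (by omega) hpar hRel htail
        · exact run_corr_cons grid m n sc hn f ih r c pr pc p 1 0 (-1) restC restF v vis
            hc0 hcn rfl (by norm_num [pvNbr]; ring) (by omega) (by omega) hpar hRel htail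
        · exact run_corr_cons grid m n sc hn f ih r c pr pc p 2 1 0 restC restF v vis
            hc0 hcn rfl (by norm_num [pvNbr]) (by omega) (by omega) hpar hRel htail
        · exact run_corr_cons grid m n sc hn f ih r c pr pc p 3 (-1) 0 restC restF v vis
            hc0 hcn rfl (by norm_num [pvNbr]; ring) (by omega) (by omega) hpar hRel htail

-- sequencing lemma for B's sweep
theorem sweepB_append (grid : List (List String)) (m n : Int) (fB : Nat) :
    ∀ (ks1 ks2 : List Int) (vis : PySem.Set Int),
      sweepB grid m n fB vis (ks1 ++ ks2) =
        (match sweepB grid m n fB vis ks1 with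
         | (true, w) => (true, w)
         | (false, w) => sweepB grid m n fB w ks2) := by
  intro ks1
  induction ks1 with
  | nil => intro ks2 vis; rfl
  | cons k ks ih =>
    intro ks2 vis
    rw [List.cons_append, sweepB, sweepB]
    by_cases hk : k ∈ vis
    · rw [if_pos hk, if_pos hk]
      exact ih ks2 vis
    · rw [if_neg hk, if_neg hk]
      rcases hr : runB grid m n (pvCell grid (PySem.Int.floordiv k n) (PySem.Int.mod k n)) fB
          (PySem.Set.add vis k) [(k, -1, 0)] with ⟨b, w⟩
      cases b
      · exact ih ks2 w
      · rfl

-- one row: B's sweep over the flat indices of row i computes A's inner loop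
theorem loopJ_corr (grid : List (List String)) (m n : Int) (hn : 0 < n) (f fM : Nat)
    (hF : (pvCells m n).length ≤ f) (hM : 6 * (pvCells m n).length + 6 ≤ fM)
    (i : Int) (hi1 : 0 ≤ i) (hi2 : i < m) :
    ∀ (js : List Int) (v : List (Int × Int)) (vis : List Int),
      (∀ j ∈ js, 0 ≤ j ∧ j < n) → RelV m n v vis →
      (sweepB grid m n fM vis (js.map (fun j => i * n + j))).1 =
          (loopAJ grid m n (f + 1) v i js).1 ∧
        RelV m n (loopAJ grid m n (f + 1) v i js).2
          (sweepB grid m n fM vis (js.map (fun j => i * n + j))).2 := by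
  intro js
  induction js with
  | nil => intro v vis _ hRel; exact ⟨rfl, hRel⟩
  | cons j js' ih =>
    intro v vis hjs hRel
    have hj := hjs j List.mem_cons_self
    rw [List.map_cons]
    have hmem : ((i, j) ∈ v) ↔ (i * n + j ∈ vis) := hRel i j hi1 hi2 hj.1 hj.2
    rw [loopAJ, sweepB]
    by_cases hv : (i, j) ∈ v
    · rw [if_pos hv, if_pos (hmem.mp hv)]
      exact ih v vis (fun x hx => hjs x (List.mem_cons_of_mem _ hx)) hRel
    · rw [if_neg hv, if_neg (fun h => hv (hmem.mpr h))]
      rw [enc_div_fst n i j hn hj.1 hj.2, enc_div_snd n i j hn hj.1 hj.2]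
      rw [cell_eq grid m n f fM v i j hi1 hi2 hj.1 hj.2 hv hF hM]
      have hcorr := run_corr grid m n (pvCell grid i j) hn fM ((i, j) :: v)
        (PySem.Set.add vis (i * n + j)) [(i, j, -1, -1, pvDirs)] [(i * n + j, -1, 0)]
        (RelV_add m n hn v vis i j hj.1 hj.2 hRel)
        (List.Forall₂.cons ⟨rfl, hj.1, hj.2, rfl, by omega, Or.inl ⟨rfl, rfl, rfl⟩⟩
          List.Forall₂.nil)
      rcases hA : machB grid m n (pvCell grid i j) fM ((i, j) :: v)
          [(i, j, -1, -1, pvDirs)] with ⟨bA, vA⟩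
      rcases hB : runB grid m n (pvCell grid i j) fM (PySem.Set.add vis (i * n + j))
          [(i * n + j, -1, 0)] with ⟨bB, visB⟩
      rw [hA, hB] at hcorr
      obtain ⟨hbe, hre⟩ := hcorr
      dsimp only at hbe hre
      subst hbe
      cases bB
      · dsimp only
        exact ih vA visB (fun x hx => hjs x (List.mem_cons_of_mem _ hx)) hre
      · exact ⟨rfl, hre⟩

-- all rows: B's flat sweep computes A's nested loops
theorem loopI_corr (grid : List (List String)) (m n : Int) (hn : 0 < n) (f fM : Nat)
    (hF : (pvCells m n).length ≤ f) (hM : 6 * (pvCells m n).length + 6 ≤ fM) :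
    ∀ (is : List Int) (v : List (Int × Int)) (vis : List Int),
      (∀ i ∈ is, 0 ≤ i ∧ i < m) → RelV m n v vis →
      (sweepB grid m n fM vis
          (is.flatMap (fun i => (PySem.List.pyRange 0 n 1).map (fun j => i * n + j)))).1 =
        loopAI grid m n (f + 1) v is := by
  intro is
  induction is with
  | nil => intro v vis _ _; rfl
  | cons i is' ih =>
    intro v vis his hRel
    have hi := his i List.mem_cons_self
    rw [List.flatMap_cons, sweepB_append]
    have hrow := loopJ_corr grid m n hn f fM hF hM i hi.1 hi.2 (PySem.List.pyRange 0 n 1)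
      v vis (fun j hj => by simpa using PySem.List.mem_pyRange_one.1 hj) hRel
    rw [loopAI]
    rcases hB : sweepB grid m n fM vis
        ((PySem.List.pyRange 0 n 1).map (fun j => i * n + j)) with ⟨b, w⟩
    rcases hA : loopAJ grid m n (f + 1) v i (PySem.List.pyRange 0 n 1) with ⟨bA, vA⟩
    rw [hA, hB] at hrow
    obtain ⟨hbe, hre⟩ := hrow
    dsimp only at hbe hre
    subst hbe
    cases b
    · dsimp only
      exact ih vA w (fun x hx => his x (List.mem_cons_of_mem _ hx)) hre
    · rfl

-- shift and flatten of ranges: range(m*n) row-major equals the nested ranges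
theorem pyRange_shift (a n : Int) :
    PySem.List.pyRange a (a + n) 1 = (PySem.List.pyRange 0 n 1).map (fun j => a + j) := by
  rw [PySem.List.pyRange_one, PySem.List.pyRange_one, List.map_map]
  simp

theorem range_flatten (m n : Int) (hm : 0 ≤ m) (hn : 0 ≤ n) :
    PySem.List.pyRange 0 (m * n) 1 =
      (PySem.List.pyRange 0 m 1).flatMap
        (fun i => (PySem.List.pyRange 0 n 1).map (fun j => i * n + j)) := by
  obtain ⟨t, rfl⟩ : ∃ t : Nat, m = (t : Int) := ⟨m.toNat, (Int.toNat_of_nonneg hm).symm⟩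
  clear hm
  induction t with
  | zero =>
    simp [PySem.List.pyRange_one_eq_nil]
  | succ t ih =>
    push_cast
    rw [show ((t : Int) + 1) * n = (t : Int) * n + n by ring]
    rw [PySem.List.pyRange_one_append 0 ((t : Int) * n) ((t : Int) * n + n)
      (mul_nonneg (Int.natCast_nonneg t) hn) (by omega)]
    rw [PySem.List.pyRange_one_succ_right (Int.natCast_nonneg t)]
    rw [List.flatMap_append]
    push_cast at ih
    rw [ih]
    congr 1
    rw [List.flatMap_cons, List.flatMap_nil, List.append_nil]
    exact pyRange_shift ((t : Int) * n) n

-- the degenerate case n = 0: A's inner loop is empty, it returns False over any rows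
theorem loopAI_false_of_nonpos (grid : List (List String)) (m n : Int) (fuel : Nat)
    (hn : n ≤ 0) : ∀ (is : List Int) (v : List (Int × Int)),
    loopAI grid m n fuel v is = false := by
  intro is
  induction is with
  | nil => intro v; rfl
  | cons i is' ih =>
    intro v
    rw [loopAI, PySem.List.pyRange_one_eq_nil hn]
    exact ih v

-- ===== VERDICT (by name: the statement is the Claim_ definition above) =====
theorem containsCycle_gemini_cot_spec : Claim_equal_containsCycle_gemini_cot := by
  intro grid _ _
  unfold Spec_containsCycle_gemini_cot containsCycle_gemini_cot containsCycle_gemini_cot_alt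
  dsimp only
  rcases Nat.eq_zero_or_pos ((PySem.List.pyGet? grid 0).getD []).length with hz | hp
  · rw [hz]
    rw [loopAI_false_of_nonpos grid (grid.length : Int) ((0 : Nat) : Int) _ (by simp)]
    rw [show ((grid.length : Int) * ((0 : Nat) : Int)) = 0 by simp]
    rw [PySem.List.pyRange_one_eq_nil (le_refl 0)]
    rfl
  · have hn : (0 : Int) < (((PySem.List.pyGet? grid 0).getD []).length : Int) := by
      exact_mod_cast hp
    rw [range_flatten (grid.length : Int) (((PySem.List.pyGet? grid 0).getD []).length : Int)
      (Int.natCast_nonneg _) (le_of_lt hn)]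
    exact (loopI_corr grid (grid.length : Int)
      (((PySem.List.pyGet? grid 0).getD []).length : Int) hn
      (((grid.length : Int)).toNat * ((((PySem.List.pyGet? grid 0).getD []).length : Int)).toNat)
      (6 * (((grid.length : Int)).toNat *
        ((((PySem.List.pyGet? grid 0).getD []).length : Int)).toNat) + 6)
      (le_of_eq (pvCells_length _ _)) (by rw [pvCells_length])
      (PySem.List.pyRange 0 (grid.length : Int) 1) [] PySem.Set.empty
      (fun i hi => by simpa using PySem.List.mem_pyRange_one.1 hi)
      (fun a b _ _ _ _ => by simp [PySem.Set.empty])).symm
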